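-- pv_equiv track=rewrite | github.com/lco-sp/5109 | so_5109.py | combinations_without_repetition
-- ===== SOURCE A (Python) =====
-- from itertools import chain,repeat,count,islice
-- from collections import Counter
--
-- def combinations_without_repetition(r, iterable=None, values=None, counts=None):
--     if iterable:
--         values, counts = zip(*Counter(iterable).items())
--
--     f = lambda i,c: chain.from_iterable(map(repeat, i, c))
--     n = len(counts)
--     indices = list(islice(f(count(),counts), r))
--     if len(indices) < r:
--         return
--     while True:
--         yield tuple(values[i] for i in indices)
--         for i,j in zip(reversed(range(r)), f(reversed(range(n)), reversed(counts))):
--             if indices[i] != j: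
--                 break
--         else:
--             return
--         j = indices[i]+1
--         for i,j in zip(range(i,r), f(count(j), counts[j:])):
--             indices[i] = j
-- ===== SOURCE B (Python) =====
-- from collections import Counter
--
-- def combinations_without_repetition(r, iterable=None, values=None, counts=None):
--     if iterable:
--         values, counts = zip(*Counter(iterable).items())
--     n = len(counts)
--     total = sum(max(c, 0) for c in counts)
--
--     def rec(pos, remaining, avail):
--         # avail = total multiplicity available at positions >= pos
--         if remaining == 0:
--             yield ()
--         elif pos < n:
--             c = max(counts[pos], 0)
--             lo = max(0, remaining - (avail - c))
--             for k in range(min(c, remaining), lo - 1, -1):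
--                 for rest in rec(pos + 1, remaining - k, avail - c):
--                     yield (pos,) * k + rest
--
--     for idxs in rec(0, r, total):
--         yield tuple(values[i] for i in idxs)
-- ===== Notes on version B (the rewrite author's own statement) =====
-- stated objective: simpler
-- what changed: A's iterative odometer over a mutable index list (scan the reversed multiset expansion for the rightmost advanceable index, then refill the tail) is replaced by a recursive generator that chooses the multiplicity k of each value position in descending order within the feasible window and recurses on the remainder, emitting the same combinations in the same lexicographic order.
import Mathlib
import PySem

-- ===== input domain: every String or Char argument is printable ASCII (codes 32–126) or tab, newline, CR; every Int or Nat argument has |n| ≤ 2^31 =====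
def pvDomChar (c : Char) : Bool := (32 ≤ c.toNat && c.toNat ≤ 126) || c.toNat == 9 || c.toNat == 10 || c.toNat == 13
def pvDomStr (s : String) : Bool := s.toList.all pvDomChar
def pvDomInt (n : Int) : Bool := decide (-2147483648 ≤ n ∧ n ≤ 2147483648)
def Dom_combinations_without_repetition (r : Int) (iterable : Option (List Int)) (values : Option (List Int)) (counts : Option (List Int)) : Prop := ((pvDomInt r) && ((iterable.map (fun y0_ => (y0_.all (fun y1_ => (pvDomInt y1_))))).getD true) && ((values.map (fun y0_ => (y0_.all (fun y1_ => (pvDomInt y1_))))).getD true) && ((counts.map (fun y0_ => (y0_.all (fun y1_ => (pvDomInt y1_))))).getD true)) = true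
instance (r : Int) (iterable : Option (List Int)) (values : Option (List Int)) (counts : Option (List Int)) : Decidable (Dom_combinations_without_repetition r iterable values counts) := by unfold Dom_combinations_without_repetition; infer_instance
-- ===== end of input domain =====

-- B replaces A's iterative index-odometer (advance the rightmost movable index, refill the tail)
-- by a recursive per-value choice of multiplicities (pruned to the feasible window), emitting the
-- same combinations in the same lexicographic order; objective: simpler (no mutable index state),
-- same asymptotic cost.
-- Both Pythons are generators; the equivalence is about the materialised list of yielded tuples.

-- ===== PORT A =====

-- shared preamble of both Pythons: `if iterable: values, counts = zip(*Counter(iterable).items())`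
-- (`iterable` truthy = a non-empty list; Counter = PySem.Dict.counter, items in first-occurrence order).
-- When the Python would read `values`/`counts` that are None it raises TypeError; those inputs are
-- outside Pre_, so `.getD []` there is a total stand-in.
def pvEff (iterable : Option (List Int)) (values : Option (List Int)) (counts : Option (List Int)) : List Int × List Int :=
  if iterable.getD [] ≠ [] then
    let items := (PySem.Dict.counter (iterable.getD [])).items
    (items.map (·.1), items.map (·.2))
  else (values.getD [], counts.getD [])

-- xs[i] for the in-range indices the programs use (stand-in default 0 outside Pre_)
def pvGetI (xs : List Int) (i : Int) : Int := (PySem.List.pyGet? xs i).getD 0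

-- f = lambda i,c: chain.from_iterable(map(repeat, i, c))  (zip-truncating, negative counts repeat 0 times)
def pvF (idxs : List Int) (cs : List Int) : List Int :=
  (idxs.zip cs).flatMap (fun p => List.replicate p.2.toNat p.1)

-- the `while True:` loop of A; fuel is a termination guard only (proved sufficient below)
def pvLoopA (vals : List Int) (cs : List Int) (rn : Nat) : Nat → List Int → List (List Int)
  | 0, _ => []
  | fuel + 1, indices =>
    let out := indices.map (fun i => pvGetI vals i)
    let n : Int := cs.length
    -- for i,j in zip(reversed(range(r)), f(reversed(range(n)), reversed(counts))): if indices[i] != j: break / else: return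
    let pairs := ((PySem.List.pyRange 0 (rn : Int) 1).reverse).zip (pvF (PySem.List.pyRange 0 n 1).reverse cs.reverse)
    match pairs.find? (fun ij => pvGetI indices ij.1 != ij.2) with
    | none => [out]
    | some ij =>
      let i := ij.1
      let j := pvGetI indices i + 1
      let csj := PySem.List.slice cs (some j) none
      -- for i,j in zip(range(i,r), f(count(j), counts[j:])): indices[i] = j
      let upds := (PySem.List.pyRange i (rn : Int) 1).zip (pvF (PySem.List.pyRange j (j + csj.length) 1) csj)
      let indices' := upds.foldl (fun acc p => acc.set p.1.toNat p.2) indices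
      out :: pvLoopA vals cs rn fuel indices'

def combinations_without_repetition (r : Int) (iterable : Option (List Int)) (values : Option (List Int)) (counts : Option (List Int)) : List (List Int) :=
  let vc := pvEff iterable values counts
  let vals := vc.1
  let cs := vc.2
  let rn : Nat := r.toNat   -- r < 0 raises ValueError in Python (outside Pre_)
  let ind0 := (pvF (PySem.List.pyRange 0 (cs.length : Int) 1) cs).take rn
  if ind0.length < rn then []
  else pvLoopA vals cs rn (((cs.map Int.toNat).sum + 2) ^ rn) ind0

-- ===== PORT B =====

-- def rec(pos, remaining, avail): ...  (yields multiplicity-prefixed index tuples, k descending,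
-- pruned to the feasible window lo..min(c, remaining); avail = multiplicity left at positions ≥ pos)
def pvRecB (cs : List Int) (pos : Nat) (remaining : Int) (avail : Int) : List (List Int) :=
  if remaining = 0 then [[]]
  else if _h : pos < cs.length then
    let c := max (pvGetI cs (pos : Int)) 0
    let lo := max 0 (remaining - (avail - c))
    (PySem.List.pyRange (min c remaining) (lo - 1) (-1)).flatMap
      (fun k => (pvRecB cs (pos + 1) (remaining - k) (avail - c)).map
        (fun rest => List.replicate k.toNat (pos : Int) ++ rest))
  else []
termination_by cs.length - pos

def combinations_without_repetition_alt (r : Int) (iterable : Option (List Int)) (values : Option (List Int)) (counts : Option (List Int)) : List (List Int) :=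
  let vc := pvEff iterable values counts
  let total := (vc.2.map (fun c => max c 0)).sum
  (pvRecB vc.2 0 r total).map (fun idxs => idxs.map (fun i => pvGetI vc.1 i))

-- ===== PRECONDITION & SPEC =====

-- Pre_ is exactly where the Python A returns normally: r ≥ 0 (islice raises ValueError on negative r),
-- and when iterable is falsy: counts is not None (else len(None) raises TypeError), and — unless r = 0
-- or fewer than r items exist in total — every position with a positive count must be indexable in
-- values (else the yield raises IndexError/TypeError).
def Pre_combinations_without_repetition (r : Int) (iterable : Option (List Int)) (values : Option (List Int)) (counts : Option (List Int)) : Prop :=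
  0 ≤ r ∧
    (iterable.getD [] ≠ [] ∨
      (counts ≠ none ∧
        (r = 0 ∨ ((((counts.getD []).map Int.toNat).sum : Int) < r ∨
          ∀ p : Nat, p < (counts.getD []).length → 0 < (counts.getD []).getD p 0 →
            p < (values.getD []).length))))

instance (r : Int) (iterable : Option (List Int)) (values : Option (List Int)) (counts : Option (List Int)) : Decidable (Pre_combinations_without_repetition r iterable values counts) := by unfold Pre_combinations_without_repetition; infer_instance

def pvWitness_combinations_without_repetition : Int × Option (List Int) × Option (List Int) × Option (List Int) := (2, none, some [5, 7], some [1, 2])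

def Spec_combinations_without_repetition (r : Int) (iterable : Option (List Int)) (values : Option (List Int)) (counts : Option (List Int)) (out : List (List Int)) : Prop := out = combinations_without_repetition_alt r iterable values counts
instance (r : Int) (iterable : Option (List Int)) (values : Option (List Int)) (counts : Option (List Int)) (out : List (List Int)) : Decidable (Spec_combinations_without_repetition r iterable values counts out) := by unfold Spec_combinations_without_repetition; infer_instance

-- ===== CLAIM (what is proved, stated in full; the proofs are below) =====
def Claim_equal_combinations_without_repetition : Prop := ∀ (r : Int) (iterable : Option (List Int)) (values : Option (List Int)) (counts : Option (List Int)), Dom_combinations_without_repetition r iterable values counts → Pre_combinations_without_repetition r iterable values counts → Spec_combinations_without_repetition r iterable values counts (combinations_without_repetition r iterable values counts)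

-- ===== LEMMAS AND PROOFS =====

-- Proof-side abstractions: counts as a List Nat (cl := cs.map Int.toNat), a combination as its
-- multiplicity vector v (one entry per value position), its expansion pvX o v as the index list
-- A keeps in `indices`, and pvE cl r = the multiplicity vectors in B's emission order.

def pvDesc (m : Nat) : List Nat := (List.range (m + 1)).map (fun i => m - i)

def pvE : List Nat → Nat → List (List Nat)
  | [], r => if r = 0 then [[]] else []
  | c :: cl, r => (pvDesc (min c r)).flatMap (fun k => (pvE cl (r - k)).map (k :: ·))

def pvX (o : Int) : List Nat → List Int
  | [] => []
  | k :: v => List.replicate k o ++ pvX (o + 1) v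

def pvHF : List Nat → Nat → List Nat
  | [], _ => []
  | c :: cl, r => min c r :: pvHF cl (r - min c r)

def pvLF : List Nat → Nat → List Nat
  | [], _ => []
  | c :: cl, r => (r - cl.sum) :: pvLF cl (min r cl.sum)

def pvBM : List Int → List Int → Option Nat
  | a :: as_, b :: bs => if a = b then (pvBM as_ bs).map (· + 1) else some 0
  | _, _ => none

-- the abstract content of one pass of A's while-loop body on state s = pvX 0 v
-- (r = s.length; i = r-1-t is the break position, j the restart value, then the tail refill)
def pvStep (cl : List Nat) (s : List Int) (t : Nat) : List Int :=
  s.take (s.length - 1 - t) ++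
    (pvX (s.getD (s.length - 1 - t) 0 + 1) (cl.drop (s.getD (s.length - 1 - t) 0 + 1).toNat)).take
      (s.length - (s.length - 1 - t))

def pvStepOK (cl : List Nat) (v w : List Nat) : Prop :=
  ∃ t, pvBM (pvX 0 v).reverse (pvX 0 cl).reverse = some t ∧
    0 ≤ (pvX 0 v).getD ((pvX 0 v).length - 1 - t) 0 ∧
    (pvX 0 v).length - ((pvX 0 v).length - 1 - t)
        ≤ (cl.drop ((pvX 0 v).getD ((pvX 0 v).length - 1 - t) 0 + 1).toNat).sum ∧
    pvStep cl (pvX 0 v) t = pvX 0 w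

lemma pvX_length (o : Int) (v : List Nat) : (pvX o v).length = v.sum := by
  induction v generalizing o with
  | nil => simp [pvX]
  | cons k v ih => simp [pvX, ih]

lemma pvX_add (v : List Nat) (o d : Int) : pvX (o + d) v = (pvX o v).map (· + d) := by
  induction v generalizing o with
  | nil => simp [pvX]
  | cons k v ih =>
    simp only [pvX, List.map_append, List.map_replicate]
    have : o + d + 1 = (o + 1) + d := by ring
    rw [this, ih]

lemma pvX_one (v : List Nat) : pvX 1 v = (pvX 0 v).map (· + 1) := by
  have := pvX_add v 0 1
  simpa using this

lemma pvX_nonneg {o x : Int} {v : List Nat} (hx : x ∈ pvX o v) : o ≤ x := by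
  induction v generalizing o with
  | nil => simp [pvX] at hx
  | cons k v ih =>
    simp only [pvX, List.mem_append, List.mem_replicate] at hx
    rcases hx with ⟨-, rfl⟩ | hx
    · exact le_refl x
    · have := ih hx; omega

lemma pvDesc_mem {k m : Nat} : k ∈ pvDesc m ↔ k ≤ m := by
  simp only [pvDesc, List.mem_map, List.mem_range]
  constructor
  · rintro ⟨i, hi, rfl⟩; omega
  · intro hk; exact ⟨m - k, by omega, by omega⟩

lemma pvDesc_succ (m : Nat) : pvDesc (m + 1) = (m + 1) :: pvDesc m := by
  simp only [pvDesc, List.range_succ_eq_map, List.map_cons, List.map_map]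
  refine congrArg₂ _ (by omega) (congrArg₂ _ (by omega) (List.map_congr_left ?_))
  intro i hi; simp [Function.comp]

lemma pvDesc_zero : pvDesc 0 = [0] := by decide

lemma pvDesc_eq_cons (m : Nat) : ∃ tl, pvDesc m = m :: tl := by
  cases m with
  | zero => exact ⟨[], pvDesc_zero⟩
  | succ m => exact ⟨pvDesc m, pvDesc_succ m⟩

lemma pvF_range (cs : List Int) (o : Int) :
    pvF (PySem.List.pyRange o (o + cs.length) 1) cs = pvX o (cs.map Int.toNat) := by
  induction cs generalizing o with
  | nil => simp [pvF, pvX, PySem.List.pyRange_one_eq_nil (by simp : (o + (([] : List Int).length : Int) ≤ o))]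
  | cons c cs ih =>
    rw [PySem.List.pyRange_one_cons (by simp)]
    simp only [pvF, List.zip_cons_cons, List.flatMap_cons, List.map_cons, pvX]
    refine congrArg₂ _ rfl ?_
    have : o + (c :: cs).length = (o + 1) + cs.length := by simp; omega
    rw [this, ← pvF, ih]

lemma pvF_reverse (a b : List Int) (h : a.length = b.length) :
    pvF a.reverse b.reverse = (pvF a b).reverse := by
  induction a generalizing b with
  | nil =>
    cases b with
    | nil => rfl
    | cons y b => simp at h
  | cons x a ih =>
    cases b with
    | nil => simp at h
    | cons y b =>
      simp only [List.length_cons, Nat.add_right_cancel_iff] at h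
      rw [List.reverse_cons, List.reverse_cons]
      unfold pvF
      rw [List.zip_append (by simp [h]), List.flatMap_append]
      have hxy : ([x].zip [y]).flatMap (fun p => List.replicate p.2.toNat p.1)
          = List.replicate y.toNat x := by simp
      rw [hxy, ← pvF, ih b h]
      simp only [pvF, List.zip_cons_cons, List.flatMap_cons]
      rw [List.reverse_append, List.reverse_replicate]

lemma pvUpdate (s u : List Int) (i r : Nat) (hs : s.length = r) (hi : i ≤ r)
    (hu : r - i ≤ u.length) :
    ((PySem.List.pyRange (i : Int) (r : Int) 1).zip u).foldl
        (fun acc p => acc.set p.1.toNat p.2) s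
      = s.take i ++ u.take (r - i) := by
  induction u generalizing s i with
  | nil =>
    have hir : i = r := by simp at hu; omega
    subst hir
    rw [PySem.List.pyRange_one_eq_nil (by omega)]
    simp [List.take_of_length_le (le_of_eq hs)]
  | cons u0 u' ih =>
    by_cases hlt : i < r
    · rw [PySem.List.pyRange_one_cons (by exact_mod_cast hlt)]
      have hcast : ((i : Int) + 1) = ((i + 1 : Nat) : Int) := by push_cast; ring
      rw [List.zip_cons_cons, List.foldl_cons, hcast]
      have hset : (s.set (i : Int).toNat u0) = s.set i u0 := by norm_num
      rw [hset, ih (s.set i u0) (i + 1) (by simp [hs]) (by omega) (by simp at hu ⊢; omega)]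
      have h1 : (s.set i u0).take (i + 1) = s.take i ++ [u0] := by
        rw [List.set_eq_take_append_cons_drop, if_pos (by omega), List.take_append]
        simp [List.length_take, Nat.min_eq_left (by omega : i ≤ s.length)]
      have h2 : r - i = (r - (i + 1)) + 1 := by omega
      rw [h1, h2, List.take_succ_cons, List.append_assoc]
      rfl
    · have hir : i = r := by omega
      subst hir
      rw [PySem.List.pyRange_one_eq_nil (by omega)]
      simp [List.take_of_length_le (le_of_eq hs)]

lemma pvBM_lt {a b : List Int} {t : Nat} (h : pvBM a b = some t) :
    t < a.length ∧ t < b.length := by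
  induction a generalizing b t with
  | nil => simp [pvBM] at h
  | cons x a ih =>
    cases b with
    | nil => simp [pvBM] at h
    | cons y b =>
      by_cases hxy : x = y
      · simp only [pvBM, if_pos hxy, Option.map_eq_some_iff] at h
        obtain ⟨t', ht', rfl⟩ := h
        have := ih ht'
        constructor <;> simp <;> omega
      · simp only [pvBM, if_neg hxy, Option.some_inj] at h
        subst h; constructor <;> simp

lemma pvBM_map_add_one (a b : List Int) :
    pvBM (a.map (· + 1)) (b.map (· + 1)) = pvBM a b := by
  induction a generalizing b with
  | nil => simp [pvBM]
  | cons x a ih =>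
    cases b with
    | nil => simp [pvBM]
    | cons y b =>
      by_cases hxy : x = y
      · subst hxy; simp only [List.map_cons, pvBM, if_pos rfl, ih]
      · simp only [List.map_cons, pvBM, if_neg hxy, if_neg (by omega : ¬ x + 1 = y + 1)]

lemma pvBM_extend {a b : List Int} {t : Nat} {u w : List Int} (h : pvBM a b = some t) :
    pvBM (a ++ u) (b ++ w) = some t := by
  induction a generalizing b t with
  | nil => simp [pvBM] at h
  | cons x a ih =>
    cases b with
    | nil => simp [pvBM] at h
    | cons y b =>
      by_cases hxy : x = y
      · simp only [pvBM, if_pos hxy, Option.map_eq_some_iff] at h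
        obtain ⟨t', ht', rfl⟩ := h
        simp only [List.cons_append, pvBM, if_pos hxy, ih ht']
        rfl
      · simp only [pvBM, if_neg hxy, Option.some_inj] at h
        subst h
        simp [List.cons_append, pvBM, if_neg hxy]

lemma pvBM_prefix (a u w : List Int) :
    pvBM (a ++ u) (a ++ w) = (pvBM u w).map (· + a.length) := by
  induction a with
  | nil => simp [Option.map_id']
  | cons x a ih =>
    simp only [List.cons_append, pvBM, if_pos rfl, ih, Option.map_map]
    cases pvBM u w
    · rfl
    · simp [Function.comp]

lemma pvBM_take (a : List Int) (n : Nat) : pvBM (a.take n) a = none := by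
  induction a generalizing n with
  | nil => simp [pvBM]
  | cons x a ih =>
    cases n with
    | zero => simp [pvBM]
    | succ n => simp [List.take_succ_cons, pvBM, ih]

lemma pvFindCongr {α : Type} (l : List α) (p q : α → Bool) (h : ∀ a ∈ l, p a = q a) :
    l.find? p = l.find? q := by
  induction l with
  | nil => rfl
  | cons x l ih =>
    simp only [List.find?_cons, h x (List.mem_cons_self)]
    cases q x
    · exact ih fun a ha => h a (List.mem_cons_of_mem _ ha)
    · rfl

lemma pvSearch (sr mr : List Int) :
    (((PySem.List.pyRange 0 (sr.length : Int) 1).reverse).zip mr).find?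
        (fun ij => pvGetI sr.reverse ij.1 != ij.2)
      = (pvBM sr mr).map (fun t => (((sr.length - 1 - t : Nat) : Int), mr.getD t 0)) := by
  induction sr generalizing mr with
  | nil =>
    rw [PySem.List.pyRange_one_eq_nil (by simp)]
    simp [pvBM]
  | cons a sr ih =>
    cases mr with
    | nil => simp [pvBM]
    | cons b mr =>
      have hcast : ((a :: sr).length : Int) = (sr.length : Int) + 1 := by simp
      rw [hcast, PySem.List.pyRange_one_succ_right (by positivity), List.reverse_append]
      simp only [List.reverse_cons, List.reverse_nil, List.nil_append, List.singleton_append,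
        List.zip_cons_cons, List.find?_cons]
      have hga : pvGetI (sr.reverse ++ [a]) (sr.length : Int) = a := by
        unfold pvGetI
        rw [show ((sr.length : Int)) = ((sr.reverse.length : Nat) : Int) by simp]
        rw [PySem.List.pyGet?_append_length]
        rfl
      by_cases hab : a = b
      · subst hab
        rw [hga]
        simp only [bne_self_eq_false]
        rw [pvFindCongr _ _ (fun ij => pvGetI sr.reverse ij.1 != ij.2) ?_, ih mr]
        · have hpb : pvBM (a :: sr) (a :: mr) = (pvBM sr mr).map (· + 1) := by
            simp [pvBM]
          rw [hpb]
          cases h' : pvBM sr mr with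
          | none => rfl
          | some t =>
            simp only [Option.map_some, Option.some_inj]
            refine congrArg₂ _ ?_ rfl
            have h2 : (a :: sr).length - 1 - (t + 1) = sr.length - 1 - t := by simp; omega
            rw [h2]
        · rintro ⟨i, z⟩ hmem
          obtain ⟨hi, -⟩ := List.of_mem_zip hmem
          rw [List.mem_reverse] at hi
          rw [PySem.List.mem_pyRange_one] at hi
          have hgi : pvGetI (sr.reverse ++ [a]) i = pvGetI sr.reverse i := by
            unfold pvGetI
            rw [PySem.List.pyGet?_of_nonneg _ hi.1, PySem.List.pyGet?_of_nonneg _ hi.1]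
            rw [List.getElem?_append_left (by simp; omega)]
          simp [hgi]
      · rw [hga]
        rw [show (a != b) = true by simp [hab]]
        simp only [pvBM, if_neg hab, Option.map_some]
        refine congrArg _ (congrArg₂ _ ?_ rfl)
        simp

lemma pvSearch' (s mr : List Int) :
    (((PySem.List.pyRange 0 (s.length : Int) 1).reverse).zip mr).find?
        (fun ij => pvGetI s ij.1 != ij.2)
      = (pvBM s.reverse mr).map (fun t => (((s.length - 1 - t : Nat) : Int), mr.getD t 0)) := by
  have h := pvSearch s.reverse mr
  simpa using h

lemma pvE_eq_nil_iff (cl : List Nat) (r : Nat) : pvE cl r = [] ↔ cl.sum < r := by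
  induction cl generalizing r with
  | nil =>
    cases r with
    | zero => simp [pvE]
    | succ r => simp [pvE]
  | cons c cl ih =>
    simp only [pvE, List.flatMap_eq_nil_iff, List.map_eq_nil_iff, List.sum_cons]
    constructor
    · intro h
      have := h (min c r) (pvDesc_mem.mpr le_rfl)
      have := (ih (r - min c r)).mp this
      omega
    · intro h k hk
      rw [pvDesc_mem] at hk
      exact (ih (r - k)).mpr (by omega)

lemma pvE_sum {cl : List Nat} {r : Nat} {v : List Nat} (hv : v ∈ pvE cl r) : v.sum = r := by
  induction cl generalizing r v with
  | nil =>
    cases r with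
    | zero => simp [pvE] at hv; simp [hv]
    | succ r => simp [pvE] at hv
  | cons c cl ih =>
    simp only [pvE, List.mem_flatMap, List.mem_map] at hv
    obtain ⟨k, hk, w, hw, rfl⟩ := hv
    rw [pvDesc_mem] at hk
    have := ih hw
    simp [this]
    omega

lemma pvE_head (cl : List Nat) (r : Nat) (h : r ≤ cl.sum) :
    (pvE cl r).head? = some (pvHF cl r) := by
  induction cl generalizing r with
  | nil =>
    simp only [List.sum_nil, Nat.le_zero] at h
    subst h
    simp [pvE, pvHF]
  | cons c cl ih =>
    simp only [pvE, pvHF]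
    have hsub : r - min c r ≤ cl.sum := by simp only [List.sum_cons] at h; omega
    have hblock : ((pvE cl (r - min c r)).map (min c r :: ·)).head?
        = some (min c r :: pvHF cl (r - min c r)) := by
      rw [List.head?_map, ih _ hsub]; rfl
    obtain ⟨tl, htl⟩ := pvDesc_eq_cons (min c r)
    rw [htl, List.flatMap_cons, List.head?_append, hblock]
    rfl

-- head of the block list: the first (greedy) block is nonempty
lemma pvFM_head (cl : List Nat) (r m : Nat) (hm : r - m ≤ cl.sum) :
    ((pvDesc m).flatMap (fun k => (pvE cl (r - k)).map (k :: ·))).head?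
      = some (m :: pvHF cl (r - m)) := by
  obtain ⟨tl, htl⟩ := pvDesc_eq_cons m
  rw [htl, List.flatMap_cons, List.head?_append, List.head?_map, pvE_head cl (r - m) hm]
  rfl

-- once the remaining budget exceeds the suffix total, every block is empty
lemma pvFM_nil (cl : List Nat) (r m : Nat) (hm : cl.sum < r - m) :
    (pvDesc m).flatMap (fun k => (pvE cl (r - k)).map (k :: ·)) = [] := by
  rw [List.flatMap_eq_nil_iff]
  intro k hk
  rw [pvDesc_mem] at hk
  rw [List.map_eq_nil_iff]
  exact (pvE_eq_nil_iff cl (r - k)).mpr (by omega)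

lemma pvE_last (cl : List Nat) (r : Nat) (h : r ≤ cl.sum) :
    (pvE cl r).getLast? = some (pvLF cl r) := by
  induction cl generalizing r with
  | nil =>
    simp only [List.sum_nil, Nat.le_zero] at h
    subst h
    simp [pvE, pvLF]
  | cons c cl ih =>
    simp only [pvE, pvLF]
    have haux : ∀ m, m ≤ r → r - cl.sum ≤ m →
        ((pvDesc m).flatMap (fun k => (pvE cl (r - k)).map (k :: ·))).getLast?
          = some ((r - cl.sum) :: pvLF cl (min r cl.sum)) := by
      intro m
      induction m with
      | zero =>
        intro hm0 hge
        rw [pvDesc_zero]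
        simp only [List.flatMap_cons, List.flatMap_nil, List.append_nil]
        rw [List.getLast?_map, show r - 0 = r from rfl, ih r (by omega)]
        have h1 : r - cl.sum = 0 := by omega
        have h2 : min r cl.sum = r := by omega
        rw [h1, h2]
        rfl
      | succ m ihm =>
        intro hm1 hge
        rw [pvDesc_succ, List.flatMap_cons, List.getLast?_append]
        by_cases hrest : r - cl.sum ≤ m
        · rw [ihm (by omega) hrest]
          rfl
        · have hm2 : r - cl.sum = m + 1 := by omega
          rw [pvFM_nil cl r m (by omega)]
          simp only [List.getLast?_nil, Option.or_none]
          rw [List.getLast?_map, ih (r - (m + 1)) (by omega)]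
          have h1 : m + 1 = r - cl.sum := by omega
          have h2 : r - (r - cl.sum) = min r cl.sum := by omega
          rw [h1, h2]
          rfl
    exact haux (min c r) (by omega) (by simp only [List.sum_cons] at h; omega)

lemma pvHF_expand (cl : List Nat) (r : Nat) (o : Int) (h : r ≤ cl.sum) :
    pvX o (pvHF cl r) = (pvX o cl).take r := by
  induction cl generalizing r o with
  | nil =>
    simp only [List.sum_nil, Nat.le_zero] at h
    subst h
    simp [pvHF, pvX]
  | cons c cl ih =>
    simp only [List.sum_cons] at h
    simp only [pvHF, pvX, List.take_append, List.take_replicate, List.length_replicate]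
    refine congrArg₂ _ (by rw [Nat.min_comm]) ?_
    rw [ih (r - min c r) (o + 1) (by omega)]
    have : r - c = r - min c r := by omega
    rw [this]

lemma pvLF_expand (cl : List Nat) (r : Nat) (o : Int) (h : r ≤ cl.sum) :
    pvX o (pvLF cl r) = (pvX o cl).drop (cl.sum - r) := by
  induction cl generalizing r o with
  | nil =>
    simp only [List.sum_nil, Nat.le_zero] at h
    subst h
    simp [pvLF, pvX]
  | cons c cl ih =>
    simp only [List.sum_cons] at h
    simp only [pvLF, pvX, List.drop_append, List.drop_replicate, List.length_replicate,
      List.sum_cons]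
    refine congrArg₂ _ ?_ ?_
    · have : r - cl.sum = c - (c + cl.sum - r) := by omega
      rw [this]
    · rw [ih (min r cl.sum) (o + 1) (by omega)]
      have : cl.sum - min r cl.sum = c + cl.sum - r - c := by omega
      rw [this]

lemma pvGeom (b n : Nat) (hb : 1 ≤ b) :
    ((List.range (n + 1)).map (b ^ ·)).sum ≤ (b + 1) ^ n := by
  induction n with
  | zero => simp
  | succ n ih =>
    rw [List.range_succ, List.map_append, List.sum_append]
    simp only [List.map_cons, List.map_nil, List.sum_cons, List.sum_nil]
    have h1 : b ^ (n + 1) ≤ b * (b + 1) ^ n := by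
      rw [pow_succ, mul_comm]
      exact Nat.mul_le_mul_left b (Nat.pow_le_pow_left (by omega) n)
    have h2 : (b + 1) ^ (n + 1) = (b + 1) ^ n + b * (b + 1) ^ n := by ring
    omega

lemma pvE_length_le (cl : List Nat) (r : Nat) : (pvE cl r).length ≤ (cl.sum + 2) ^ r := by
  induction cl generalizing r with
  | nil =>
    cases r with
    | zero => simp [pvE]
    | succ r => simp [pvE]
  | cons c cl ih =>
    simp only [pvE, List.length_flatMap, List.sum_cons]
    set m := min c r with hm
    set b := cl.sum + 2 with hb
    have hmr : m ≤ r := by omega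
    have step1 : (List.map (fun k => ((pvE cl (r - k)).map (k :: ·)).length) (pvDesc m)).sum
        ≤ (List.map (fun k => b ^ (r - k)) (pvDesc m)).sum := by
      apply List.sum_le_sum
      intro k hk
      rw [List.length_map]
      exact ih (r - k)
    have step2 : (List.map (fun k => b ^ (r - k)) (pvDesc m)).sum
        = (List.map (fun i => b ^ (r - m) * b ^ i) (List.range (m + 1))).sum := by
      simp only [pvDesc, List.map_map]
      apply congrArg
      apply List.map_congr_left
      intro i hi
      rw [List.mem_range] at hi
      have : r - (m - i) = (r - m) + i := by omega
      simp [Function.comp, this, pow_add]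
    have step3 : (List.map (fun i => b ^ (r - m) * b ^ i) (List.range (m + 1))).sum
        = b ^ (r - m) * (List.map (b ^ ·) (List.range (m + 1))).sum := by
      rw [← List.sum_map_mul_left]
    have step4 : (List.map (b ^ ·) (List.range (m + 1))).sum ≤ (b + 1) ^ m :=
      pvGeom b m (by omega)
    by_cases hc : c = 0
    · subst hc
      have hm0 : m = 0 := by omega
      calc (List.map (fun k => ((pvE cl (r - k)).map (k :: ·)).length) (pvDesc m)).sum
          ≤ b ^ (r - m) * (List.map (b ^ ·) (List.range (m + 1))).sum := by
            rw [← step3, ← step2]; exact step1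
        _ = b ^ r := by rw [hm0]; simp
        _ ≤ (0 + (cl.sum + 2)) ^ r := by rw [hb]; simp
    · calc (List.map (fun k => ((pvE cl (r - k)).map (k :: ·)).length) (pvDesc m)).sum
          ≤ b ^ (r - m) * (List.map (b ^ ·) (List.range (m + 1))).sum := by
            rw [← step3, ← step2]; exact step1
        _ ≤ b ^ (r - m) * (b + 1) ^ m := Nat.mul_le_mul_left _ step4
        _ ≤ (b + 1) ^ (r - m) * (b + 1) ^ m :=
            Nat.mul_le_mul_right _ (Nat.pow_le_pow_left (by omega) _)
        _ = (b + 1) ^ r := by rw [← pow_add]; congr 1; omega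
        _ ≤ (c + (cl.sum + 2)) ^ r := Nat.pow_le_pow_left (by omega) _

lemma pvStepOK_cons (c k : Nat) (cl : List Nat) {v w : List Nat}
    (h : pvStepOK cl v w) : pvStepOK (c :: cl) (k :: v) (k :: w) := by
  obtain ⟨t, hbm, hge, hfeas, hupd⟩ := h
  have ht : t < (pvX 0 v).length := by
    have := (pvBM_lt hbm).1
    simpa using this
  have hfull : pvX 0 (k :: v) = List.replicate k 0 ++ (pvX 0 v).map (· + 1) := by
    simp [pvX, pvX_one]
  have hfullc : pvX 0 (c :: cl) = List.replicate c 0 ++ (pvX 0 cl).map (· + 1) := by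
    simp [pvX, pvX_one]
  have hlen : (pvX 0 (k :: v)).length = k + (pvX 0 v).length := by
    simp [hfull]
  refine ⟨t, ?_, ?_, ?_, ?_⟩
  · rw [hfull, hfullc, List.reverse_append, List.reverse_append, List.reverse_replicate,
      List.reverse_replicate, ← List.map_reverse, ← List.map_reverse]
    exact pvBM_extend (by rw [pvBM_map_add_one]; exact hbm)
  · rw [hlen, hfull]
    have hidx : k + (pvX 0 v).length - 1 - t = k + ((pvX 0 v).length - 1 - t) := by omega
    rw [hidx, List.getD_append_right _ _ _ _ (by simp only [List.length_replicate]; omega)]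
    simp only [List.length_replicate, Nat.add_sub_cancel_left]
    rw [List.getD_eq_getElem?_getD, List.getElem?_map]
    rw [List.getElem?_eq_getElem (by omega)]
    simp only [Option.map_some, Option.getD_some]
    rw [List.getD_eq_getElem?_getD, List.getElem?_eq_getElem (by omega)] at hge
    simp only [Option.getD_some] at hge
    omega
  · rw [hlen, hfull]
    have hidx : k + (pvX 0 v).length - 1 - t = k + ((pvX 0 v).length - 1 - t) := by omega
    rw [hidx, List.getD_append_right _ _ _ _ (by simp only [List.length_replicate]; omega)]
    simp only [List.length_replicate, Nat.add_sub_cancel_left]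
    set i := (pvX 0 v).length - 1 - t with hi
    have hmap : ((pvX 0 v).map (· + 1)).getD i 0 = (pvX 0 v).getD i 0 + 1 := by
      rw [List.getD_eq_getElem?_getD, List.getElem?_map, List.getElem?_eq_getElem (by omega)]
      rw [List.getD_eq_getElem?_getD, List.getElem?_eq_getElem (by omega)]
      rfl
    rw [hmap]
    have hge' : 0 ≤ (pvX 0 v).getD i 0 := hge
    have htn : ((pvX 0 v).getD i 0 + 1 + 1).toNat = ((pvX 0 v).getD i 0 + 1).toNat + 1 := by
      omega
    rw [htn, List.drop_succ_cons]
    have : k + (pvX 0 v).length - (k + i) = (pvX 0 v).length - i := by omega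
    rw [this]
    exact hfeas
  · unfold pvStep at hupd ⊢
    rw [hlen, hfull]
    have hidx : k + (pvX 0 v).length - 1 - t = k + ((pvX 0 v).length - 1 - t) := by omega
    rw [hidx, List.getD_append_right _ _ _ _ (by simp only [List.length_replicate]; omega)]
    simp only [List.length_replicate, Nat.add_sub_cancel_left]
    set i := (pvX 0 v).length - 1 - t with hi
    have hmap : ((pvX 0 v).map (· + 1)).getD i 0 = (pvX 0 v).getD i 0 + 1 := by
      rw [List.getD_eq_getElem?_getD, List.getElem?_map, List.getElem?_eq_getElem (by omega)]
      rw [List.getD_eq_getElem?_getD, List.getElem?_eq_getElem (by omega)]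
      rfl
    rw [hmap]
    set jv := (pvX 0 v).getD i 0 with hjv
    have hge' : 0 ≤ jv := hge
    have htn : (jv + 1 + 1).toNat = (jv + 1).toNat + 1 := by omega
    rw [htn, List.drop_succ_cons]
    have h1 : (List.replicate k (0 : Int) ++ (pvX 0 v).map (· + 1)).take (k + i)
        = List.replicate k 0 ++ ((pvX 0 v).take i).map (· + 1) := by
      rw [List.take_append]
      simp only [List.length_replicate]
      rw [List.take_replicate, Nat.min_eq_right (by omega), Nat.add_sub_cancel_left,
        List.map_take]
    have h2 : k + (pvX 0 v).length - (k + i) = (pvX 0 v).length - i := by omega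
    have h3 : pvX (jv + 1 + 1) (cl.drop (jv + 1).toNat)
        = (pvX (jv + 1) (cl.drop (jv + 1).toNat)).map (· + 1) := by
      rw [← pvX_add]
    rw [h1, h2, h3, ← List.map_take, List.append_assoc, ← List.map_append, hupd]
    simp [pvX, pvX_one]

lemma pvStepOK_boundary (c : Nat) (cl : List Nat) (k r' : Nat) (h : r' < cl.sum) :
    pvStepOK (c :: cl) ((k + 1) :: pvLF cl r') (k :: pvHF cl (r' + 1)) := by
  have hsL : pvX 0 (pvLF cl r') = (pvX 0 cl).drop (cl.sum - r') :=
    pvLF_expand cl r' 0 (le_of_lt h)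
  have hmlen : (pvX 0 cl).length = cl.sum := pvX_length 0 cl
  have hsLlen : (pvX 0 (pvLF cl r')).length = r' := by
    rw [hsL, List.length_drop, hmlen]; omega
  have hfull : pvX 0 ((k + 1) :: pvLF cl r')
      = List.replicate (k + 1) 0 ++ (pvX 0 (pvLF cl r')).map (· + 1) := by
    simp [pvX, pvX_one]
  have hfullc : pvX 0 (c :: cl) = List.replicate c 0 ++ (pvX 0 cl).map (· + 1) := by
    simp [pvX, pvX_one]
  have hlen : (pvX 0 ((k + 1) :: pvLF cl r')).length = (k + 1) + r' := by
    simp [hfull, hsLlen]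
  have hrev : (pvX 0 (pvLF cl r')).reverse = (pvX 0 cl).reverse.take r' := by
    rw [hsL, List.reverse_drop, hmlen]
    congr 1; omega
  have hbmfull : pvBM (pvX 0 ((k + 1) :: pvLF cl r')).reverse (pvX 0 (c :: cl)).reverse
      = some r' := by
    rw [hfull, hfullc, List.reverse_append, List.reverse_append, List.reverse_replicate,
      List.reverse_replicate, ← List.map_reverse, ← List.map_reverse, hrev]
    set mr := (pvX 0 cl).reverse with hmr
    have hsplit : mr.map (· + 1) = (mr.take r').map (· + 1) ++ (mr.drop r').map (· + 1) := by
      rw [← List.map_append, List.take_append_drop]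
    rw [hsplit, List.append_assoc, pvBM_prefix]
    have hlt : r' < mr.length := by rw [hmr, List.length_reverse, hmlen]; exact h
    rw [List.drop_eq_getElem_cons hlt]
    have hnnall : ∀ x ∈ mr, (0 : Int) ≤ x := by
      intro x hx
      rw [hmr, List.mem_reverse] at hx
      exact pvX_nonneg hx
    have hnn : 0 ≤ mr[r'] := hnnall _ (List.getElem_mem _)
    simp only [List.map_cons, List.replicate_succ, List.cons_append, pvBM]
    rw [if_neg (by omega)]
    simp only [Option.map_some, Option.some_inj]
    simp only [List.length_map, List.length_take, hmr, List.length_reverse, hmlen]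
    omega
  refine ⟨r', hbmfull, ?_, ?_, ?_⟩
  · rw [hlen, hfull]
    have hidx : (k + 1) + r' - 1 - r' = k := by omega
    rw [hidx, List.getD_append _ _ _ _ (by simp), List.getD_replicate _ (by omega)]
  · rw [hlen, hfull]
    have hidx : (k + 1) + r' - 1 - r' = k := by omega
    rw [hidx, List.getD_append _ _ _ _ (by simp), List.getD_replicate _ (by omega)]
    norm_num
    omega
  · unfold pvStep
    rw [hlen, hfull]
    have hidx : (k + 1) + r' - 1 - r' = k := by omega
    rw [hidx, List.getD_append _ _ _ _ (by simp), List.getD_replicate _ (by omega)]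
    have h1 : (List.replicate (k + 1) (0 : Int) ++ (pvX 0 (pvLF cl r')).map (· + 1)).take k
        = List.replicate k 0 := by
      rw [List.take_append, List.take_replicate, Nat.min_eq_left (by omega)]
      simp
    have h2 : (k + 1) + r' - k = r' + 1 := by omega
    have h3 : ((0 : Int) + 1).toNat = 1 := by decide
    rw [h1, h2, h3, List.drop_one, List.tail_cons]
    have h4 : pvX (0 + 1) cl = (pvX 0 cl).map (· + 1) := by rw [← pvX_add]
    rw [h4, ← List.map_take, ← pvHF_expand cl (r' + 1) 0 (by omega)]
    simp [pvX, pvX_one]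

lemma pvAdj (cl : List Nat) (r : Nat) : List.IsChain (pvStepOK cl) (pvE cl r) := by
  induction cl generalizing r with
  | nil =>
    cases r with
    | zero => simp [pvE]
    | succ r => simp [pvE]
  | cons c cl ih =>
    show List.IsChain (pvStepOK (c :: cl)) ((pvDesc (min c r)).flatMap _)
    have haux : ∀ m, m ≤ r →
        List.IsChain (pvStepOK (c :: cl))
          ((pvDesc m).flatMap (fun k => (pvE cl (r - k)).map (k :: ·))) := by
      intro m
      induction m with
      | zero =>
        intro _
        rw [pvDesc_zero]
        simp only [List.flatMap_cons, List.flatMap_nil, List.append_nil]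
        rw [List.isChain_map]
        exact (ih r).imp (fun a b hab => pvStepOK_cons c 0 cl hab)
      | succ m ihm =>
        intro hm1
        rw [pvDesc_succ, List.flatMap_cons]
        rw [List.isChain_append]
        refine ⟨?_, ihm (by omega), ?_⟩
        · rw [List.isChain_map]
          exact (ih (r - (m + 1))).imp (fun a b hab => pvStepOK_cons c (m + 1) cl hab)
        · intro x hx y hy
          by_cases hne : r - (m + 1) ≤ cl.sum
          · rw [List.getLast?_map, pvE_last cl (r - (m + 1)) hne] at hx
            simp only [Option.map_some, Option.mem_def, Option.some_inj] at hx
            by_cases hne2 : r - m ≤ cl.sum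
            · rw [pvFM_head cl r m hne2] at hy
              simp only [Option.mem_def, Option.some_inj] at hy
              subst hx; subst hy
              have hlt : r - (m + 1) < cl.sum := by omega
              have hr1 : r - (m + 1) + 1 = r - m := by omega
              have := pvStepOK_boundary c cl m (r - (m + 1)) hlt
              rwa [hr1] at this
            · rw [pvFM_nil cl r m (by omega)] at hy
              simp at hy
          · rw [List.getLast?_map] at hx
            rw [(pvE_eq_nil_iff cl (r - (m + 1))).mpr (by omega)] at hx
            simp at hx
    exact haux (min c r) (by omega)

lemma pvBody_none (vals cs : List Int) (rn fuel : Nat) (s : List Int)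
    (hs : s.length = rn)
    (hbm : pvBM s.reverse (pvX 0 (cs.map Int.toNat)).reverse = none) :
    pvLoopA vals cs rn (fuel + 1) s = [s.map (fun i => pvGetI vals i)] := by
  have hstream : pvF ((PySem.List.pyRange 0 (cs.length : Int) 1).reverse) cs.reverse
      = (pvX 0 (cs.map Int.toNat)).reverse := by
    rw [pvF_reverse _ _ (by simp [PySem.List.length_pyRange_one])]
    have := pvF_range cs 0
    simp only [zero_add] at this
    rw [this]
  simp only [pvLoopA, hstream]
  rw [show ((rn : Nat) : Int) = ((s.length : Nat) : Int) by simp [hs]]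
  rw [pvSearch' s ((pvX 0 (cs.map Int.toNat)).reverse), hbm]
  rfl

lemma pvBody_some (vals cs : List Int) (rn fuel : Nat) (s : List Int) (t : Nat)
    (hs : s.length = rn)
    (hbm : pvBM s.reverse (pvX 0 (cs.map Int.toNat)).reverse = some t)
    (hge : 0 ≤ s.getD (rn - 1 - t) 0)
    (hfeas : rn - (rn - 1 - t) ≤ ((cs.map Int.toNat).drop (s.getD (rn - 1 - t) 0 + 1).toNat).sum) :
    pvLoopA vals cs rn (fuel + 1) s
      = s.map (fun i => pvGetI vals i) ::
        pvLoopA vals cs rn fuel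
          (s.take (rn - 1 - t) ++
            (pvX (s.getD (rn - 1 - t) 0 + 1) ((cs.map Int.toNat).drop (s.getD (rn - 1 - t) 0 + 1).toNat)).take (rn - (rn - 1 - t))) := by
  have ht : t < rn := by
    have := (pvBM_lt hbm).1
    simp only [List.length_reverse, hs] at this
    exact this
  have hstream : pvF ((PySem.List.pyRange 0 (cs.length : Int) 1).reverse) cs.reverse
      = (pvX 0 (cs.map Int.toNat)).reverse := by
    rw [pvF_reverse _ _ (by simp [PySem.List.length_pyRange_one])]
    have := pvF_range cs 0
    simp only [zero_add] at this
    rw [this]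
  simp only [pvLoopA, hstream]
  rw [show ((rn : Nat) : Int) = ((s.length : Nat) : Int) by simp [hs]]
  rw [pvSearch' s ((pvX 0 (cs.map Int.toNat)).reverse), hbm]
  simp only [Option.map_some, hs]
  refine congrArg₂ _ rfl ?_
  have hgj : pvGetI s ((rn - 1 - t : Nat) : Int) = s.getD (rn - 1 - t) 0 := by
    unfold pvGetI
    rw [PySem.List.pyGet?_natCast, List.getD_eq_getElem?_getD]
  rw [hgj]
  set jv := s.getD (rn - 1 - t) 0 with hjv
  have hslice : PySem.List.slice cs (some (jv + 1)) none = cs.drop (jv + 1).toNat :=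
    PySem.List.slice_from _ (by omega)
  rw [hslice]
  have hstream2 : pvF (PySem.List.pyRange (jv + 1) (jv + 1 + ((cs.drop (jv + 1).toNat).length : Int)) 1)
      (cs.drop (jv + 1).toNat) = pvX (jv + 1) ((cs.map Int.toNat).drop (jv + 1).toNat) := by
    rw [pvF_range, List.map_drop]
  rw [hstream2]
  rw [pvUpdate s _ (rn - 1 - t) rn hs (by omega)
    (by rw [pvX_length]; exact hfeas)]

lemma pvLoop_run (vals cs : List Int) (rn : Nat) (l : List (List Nat)) (fuel : Nat)
    (hne : l ≠ []) (hfuel : l.length ≤ fuel)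
    (hchain : List.IsChain (pvStepOK (cs.map Int.toNat)) l)
    (hsum : ∀ v ∈ l, v.sum = rn)
    (hlast : pvBM (pvX 0 (l.getLast hne)).reverse (pvX 0 (cs.map Int.toNat)).reverse = none) :
    pvLoopA vals cs rn fuel (pvX 0 (l.head hne))
      = l.map (fun u => (pvX 0 u).map (fun i => pvGetI vals i)) := by
  induction l generalizing fuel with
  | nil => exact absurd rfl hne
  | cons v rest ih =>
    cases fuel with
    | zero => simp at hfuel
    | succ fuel =>
      have hsv : (pvX 0 v).length = rn := by
        rw [pvX_length]; exact hsum v (by simp)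
      cases rest with
      | nil =>
        simp only [List.head_cons]
        rw [pvBody_none vals cs rn fuel (pvX 0 v) hsv (by simpa using hlast)]
        simp
      | cons w rest' =>
        rw [List.isChain_cons_cons] at hchain
        obtain ⟨⟨t, hbm, hge, hfeas, hupd⟩, hchain'⟩ := hchain
        unfold pvStep at hupd
        rw [hsv] at hge hfeas hupd
        simp only [List.head_cons]
        rw [pvBody_some vals cs rn fuel (pvX 0 v) t hsv hbm hge hfeas, hupd]
        have hrest : (w :: rest') ≠ [] := by simp
        have hlast' : pvBM (pvX 0 ((w :: rest').getLast hrest)).reverse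
            (pvX 0 (cs.map Int.toNat)).reverse = none := by
          rwa [show (v :: w :: rest').getLast hne = (w :: rest').getLast hrest from
            List.getLast_cons hrest] at hlast
        have := ih fuel hrest (by simp only [List.length_cons] at hfuel ⊢; omega) hchain'
          (fun u hu => hsum u (List.mem_cons_of_mem _ hu)) hlast'
        simp only [List.head_cons] at this
        rw [this]
        simp

lemma pvX_replicate_zero (n : Nat) (o : Int) : pvX o (List.replicate n 0) = [] := by
  induction n generalizing o with
  | zero => rfl
  | succ n ih => simp [List.replicate_succ, pvX, ih]

lemma pvE_zero (cl : List Nat) : pvE cl 0 = [List.replicate cl.length 0] := by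
  induction cl with
  | nil => rfl
  | cons c cl ih =>
    simp only [pvE, Nat.min_zero, pvDesc_zero, List.flatMap_cons, List.flatMap_nil,
      List.append_nil, ih]
    simp [List.replicate_succ]

lemma pvMaxSum (cs : List Int) :
    (cs.map (fun c => max c 0)).sum = ((cs.map Int.toNat).sum : Int) := by
  induction cs with
  | nil => rfl
  | cons c cs ih => simp only [List.map_cons, List.sum_cons, ih]; omega

lemma pvRecB_eq (cs : List Int) (pos : Nat) (rr : Nat) (avail : Int) (hpos : pos ≤ cs.length)
    (havail : avail = (((cs.drop pos).map Int.toNat).sum : Int)) :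
    pvRecB cs pos ((rr : Nat) : Int) avail
      = (pvE ((cs.drop pos).map Int.toNat) rr).map (pvX (pos : Int)) := by
  have main : ∀ d pos (rr : Nat) (avail : Int), cs.length - pos ≤ d → pos ≤ cs.length →
      avail = (((cs.drop pos).map Int.toNat).sum : Int) →
      pvRecB cs pos ((rr : Nat) : Int) avail
        = (pvE ((cs.drop pos).map Int.toNat) rr).map (pvX (pos : Int)) := by
    intro d
    induction d with
    | zero =>
      intro pos rr avail hd hpos havail
      have hpl : pos = cs.length := by omega
      rw [pvRecB]
      rw [List.drop_of_length_le (by omega)]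
      by_cases hrr : rr = 0
      · subst hrr
        simp [pvE, pvX]
      · rw [if_neg (by exact_mod_cast hrr), dif_neg (by omega)]
        simp only [List.map_nil]
        rw [show pvE [] rr = [] by simp [pvE, hrr]]
        rfl
    | succ d ihd =>
      intro pos rr avail hd hpos havail
      by_cases hpl : pos = cs.length
      · subst hpl
        rw [pvRecB, List.drop_of_length_le (by omega)]
        by_cases hrr : rr = 0
        · subst hrr; simp [pvE, pvX]
        · rw [if_neg (by exact_mod_cast hrr), dif_neg (by omega)]
          simp only [List.map_nil]
          rw [show pvE [] rr = [] by simp [pvE, hrr]]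
          rfl
      · have hlt : pos < cs.length := by omega
        rw [pvRecB]
        by_cases hrr : rr = 0
        · subst hrr
          rw [if_pos (by norm_num)]
          rw [pvE_zero, List.map_cons, List.map_nil, pvX_replicate_zero]
        · rw [if_neg (by exact_mod_cast hrr), dif_pos hlt]
          dsimp only
          have hdrop : cs.drop pos = cs[pos] :: cs.drop (pos + 1) :=
            List.drop_eq_getElem_cons hlt
          have hget : pvGetI cs (pos : Int) = cs[pos] := by
            unfold pvGetI
            rw [PySem.List.pyGet?_natCast, List.getElem?_eq_getElem hlt]
            rfl
          rw [hget]
          set c := cs[pos].toNat with hc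
          set T' := ((cs.drop (pos + 1)).map Int.toNat).sum with hT'
          have hmax : max cs[pos] 0 = (c : Int) := by rw [hc, Int.toNat_eq_max]
          have havail' : avail - max cs[pos] 0 = (T' : Int) := by
            rw [havail, hdrop, hmax]
            simp only [List.map_cons, List.sum_cons, ← hc, ← hT']
            push_cast
            ring
          have hmin : min (max cs[pos] 0) ((rr : Nat) : Int) = ((min c rr : Nat) : Int) := by
            rw [hmax]; norm_cast
          rw [hmin, havail']
          set m := min c rr with hm
          set loN := rr - T' with hlo
          have hloc : max 0 (((rr : Nat) : Int) - (T' : Int)) = ((loN : Nat) : Int) := by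
            omega
          rw [hloc]
          rw [hdrop]
          simp only [List.map_cons, pvE, ← hc]
          rw [← hm, List.map_flatMap]
          by_cases hml : m < loN
          · -- infeasible: the k-window is empty and every block of pvE is empty
            rw [PySem.List.pyRange_neg_one]
            rw [show (((m : Nat) : Int) - (((loN : Nat) : Int) - 1)).toNat = 0 by omega]
            simp only [List.range_zero, List.map_nil, List.flatMap_nil]
            symm
            rw [List.flatMap_eq_nil_iff]
            intro k hk
            rw [pvDesc_mem] at hk
            rw [show (pvE (List.map Int.toNat (cs.drop (pos + 1))) (rr - k)).map (k :: ·) = []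
              from by rw [(pvE_eq_nil_iff _ _).mpr (by rw [← hT']; omega)]; rfl]
            rfl
          · have hle : loN ≤ m := by omega
            rw [PySem.List.pyRange_neg_one]
            rw [show (((m : Nat) : Int) - (((loN : Nat) : Int) - 1)).toNat = m - loN + 1 by omega]
            rw [List.flatMap_map]
            -- split the unpruned descending range; the pruned-away tail blocks are all empty
            have hsplit : List.range (m + 1)
                = List.range (m - loN + 1) ++ (List.range loN).map ((m - loN + 1) + ·) := by
              rw [show m + 1 = (m - loN + 1) + loN by omega, List.range_add]
            simp only [pvDesc, List.flatMap_map]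
            rw [hsplit, List.flatMap_append, List.flatMap_map]
            have hnil : (List.range loN).flatMap
                (fun j => List.map (pvX (pos : Int))
                  (List.map (fun x => (m - ((m - loN + 1) + j)) :: x)
                    (pvE (List.map Int.toNat (cs.drop (pos + 1)))
                      (rr - (m - ((m - loN + 1) + j)))))) = [] := by
              rw [List.flatMap_eq_nil_iff]
              intro j hj
              rw [List.mem_range] at hj
              rw [show (pvE (List.map Int.toNat (cs.drop (pos + 1)))
                  (rr - (m - ((m - loN + 1) + j)))) = [] from
                (pvE_eq_nil_iff _ _).mpr (by rw [← hT']; omega)]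
              rfl
            rw [hnil, List.append_nil]
            apply List.flatMap_congr
            intro i hi
            rw [List.mem_range] at hi
            have hik : ((m : Nat) : Int) - (i : Int) = (((m - i : Nat)) : Int) := by omega
            rw [hik]
            have hsub : ((rr : Nat) : Int) - ((m - i : Nat) : Int)
                = (((rr - (m - i)) : Nat) : Int) := by
              have : m - i ≤ rr := by omega
              omega
            rw [hsub]
            rw [ihd (pos + 1) (rr - (m - i)) (T' : Int) (by omega) (by omega) rfl]
            rw [List.map_map, List.map_map]
            apply List.map_congr_left
            intro w hw
            simp only [Function.comp_apply]
            show List.replicate ((((m - i : Nat)) : Int)).toNat (pos : Int)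
                ++ pvX ((pos + 1 : Nat) : Int) w
                = pvX (pos : Int) ((m - i) :: w)
            rw [Int.toNat_natCast]
            simp only [pvX]
            rw [show ((pos + 1 : Nat) : Int) = (pos : Int) + 1 by push_cast; ring]
  exact main (cs.length - pos) pos rr avail le_rfl hpos havail

-- ===== VERDICT (by name: the statement is the Claim_ definition above) =====
theorem combinations_without_repetition_spec : Claim_equal_combinations_without_repetition := by
  intro r iterable values counts _hdom hpre
  unfold Spec_combinations_without_repetition
  unfold combinations_without_repetition combinations_without_repetition_alt
  dsimp only
  obtain ⟨hr, -⟩ := hpre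
  set vc := pvEff iterable values counts with hvc
  set vals := vc.1
  set cs := vc.2
  set cl := cs.map Int.toNat with hcl
  set rn : Nat := r.toNat with hrn
  have hr' : ((rn : Nat) : Int) = r := Int.toNat_of_nonneg hr
  -- B side
  rw [← hr', pvMaxSum cs, pvRecB_eq cs 0 rn _ (by simp) (by simp)]
  simp only [List.drop_zero]
  -- A side
  have hstream : pvF (PySem.List.pyRange 0 (cs.length : Int) 1) cs = pvX 0 cl := by
    have := pvF_range cs 0
    simpa using this
  rw [hstream]
  have hXlen : (pvX 0 cl).length = cl.sum := pvX_length 0 cl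
  by_cases hT : cl.sum < rn
  · -- too few items: A returns [] before looping, B's enumeration is empty
    rw [if_pos (by simp [hXlen]; omega)]
    rw [(pvE_eq_nil_iff cl rn).mpr hT]
    simp
  · push_neg at hT
    rw [if_neg (by simp [hXlen]; omega)]
    have hne : pvE cl rn ≠ [] := by
      intro h; exact absurd ((pvE_eq_nil_iff cl rn).mp h) (by omega)
    have hhead : (pvE cl rn).head hne = pvHF cl rn := by
      have := pvE_head cl rn hT
      rwa [List.head?_eq_head hne, Option.some_inj] at this
    have hlastv : (pvE cl rn).getLast hne = pvLF cl rn := by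
      have := pvE_last cl rn hT
      rwa [List.getLast?_eq_getLast hne, Option.some_inj] at this
    have hinit : (pvX 0 cl).take rn = pvX 0 ((pvE cl rn).head hne) := by
      rw [hhead, pvHF_expand cl rn 0 hT]
    rw [hinit]
    rw [pvLoop_run vals cs rn (pvE cl rn) _ hne
      (le_trans (pvE_length_le cl rn) le_rfl)
      (pvAdj cl rn) (fun v hv => pvE_sum hv) ?_]
    · simp [List.map_map]; rfl
    · rw [hlastv, pvLF_expand cl rn 0 hT, List.reverse_drop]
      rw [hXlen]
      exact pvBM_take (pvX 0 cl).reverse (cl.sum - (cl.sum - rn))
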